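-- pv_equiv track=rewrite | github.com/ppo2020/SIGMOD2021ID73 | proc/train/basic.py | stringToBagofgrams
-- ===== SOURCE A (Python) =====
-- def stringToBagofgrams(record_s, gram_len):
--     record_v = []
--     if len(record_s) < gram_len:
--         s = ''
--         for i in range(gram_len - len(record_s)):
--             s += '#'
--         record_v.append(record_s + s)
--         return
--     freq = {}
--     for sid in range(len(record_s) - gram_len + 1):
--         ss = record_s[sid: sid + gram_len]
--         if ss not in freq:
--             freq[ss] = 0
--             record_v.append(ss)
--         else:
--             freq[ss] += 1
--             record_v.append(ss + "#" + str(freq[ss]))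
--     return record_v
-- ===== SOURCE B (Python) =====
-- def stringToBagofgrams(record_s, gram_len):
--     # Equivalence is about the return value: A returns None on the short branch
--     # (its padded gram only lands in a local list), so B just returns None there.
--     if len(record_s) < gram_len:
--         return None
--     grams = [record_s[i: i + gram_len] for i in range(len(record_s) - gram_len + 1)]
--     positions = {}
--     for i, g in enumerate(grams):
--         positions.setdefault(g, []).append(i)
--     out = [None] * len(grams)
--     for g, ps in positions.items():
--         for k, i in enumerate(ps):
--             out[i] = g if k == 0 else g + "#" + str(k)
--     return out
-- ===== Notes on version B (the rewrite author's own statement) =====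
-- stated objective: alternative
-- what changed: B replaces A's stateful running-counter dict with a stateless two-phase form: build the list of gram windows once, then tag each position by counting its gram among the earlier windows.
import Mathlib
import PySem

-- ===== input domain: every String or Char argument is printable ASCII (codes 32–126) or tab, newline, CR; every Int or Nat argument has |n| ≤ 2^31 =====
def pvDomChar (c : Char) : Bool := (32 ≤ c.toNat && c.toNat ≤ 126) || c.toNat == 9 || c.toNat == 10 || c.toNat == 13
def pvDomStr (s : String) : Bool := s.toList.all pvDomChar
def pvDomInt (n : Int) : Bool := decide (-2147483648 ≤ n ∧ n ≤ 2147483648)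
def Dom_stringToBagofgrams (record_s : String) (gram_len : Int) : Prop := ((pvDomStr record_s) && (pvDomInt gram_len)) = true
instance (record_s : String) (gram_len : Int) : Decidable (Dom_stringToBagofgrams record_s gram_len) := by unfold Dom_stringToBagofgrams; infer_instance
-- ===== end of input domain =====

-- B groups window positions per gram in one dict pass and scatter-writes each gram's numbered
-- occurrences into a preallocated output, instead of A's sequential running-counter dict —
-- objective: alternative decomposition; return-value equivalence (A's short branch returns None).


-- ===== PORT A =====
-- A's short branch builds '#'-padding and appends it to the local record_v, then `return`s
-- no value: the observable result is None, ported as `none` (the local list is dead).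
def stringToBagofgrams (record_s : String) (gram_len : Int) : Option (List String) :=
  if PySem.Str.len record_s < gram_len then
    none
  else
    let st := (PySem.List.pyRange 0 (PySem.Str.len record_s - gram_len + 1) 1).foldl
      (fun (st : PySem.Dict String Int × List String) sid =>
        let ss := PySem.Str.slice record_s (some sid) (some (sid + gram_len))
        if st.1.contains ss then
          let freq' := st.1.modify ss 0 (· + 1)
          (freq', st.2 ++ [ss ++ "#" ++ PySem.Int.toStr (freq'.getD ss 0)])
        else
          (st.1.insert ss 0, st.2 ++ [ss]))
      (PySem.Dict.empty, ([] : List String))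
    some st.2

-- ===== PORT B =====
-- `positions.setdefault(g, []).append(i)` is `modify g [] (· ++ [i])`; `out = [None] * len(grams)`
-- uses "" as the placeholder (every slot is overwritten); `out[i] = v` is `set i.toNat v`
-- (the written indices come from `enumerate`, hence are nonnegative and in range).
def stringToBagofgrams_alt (record_s : String) (gram_len : Int) : Option (List String) :=
  if PySem.Str.len record_s < gram_len then
    none
  else
    let grams := (PySem.List.pyRange 0 (PySem.Str.len record_s - gram_len + 1) 1).map
      (fun i => PySem.Str.slice record_s (some i) (some (i + gram_len)))
    let positions := (PySem.List.enumerate grams 0).foldl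
      (fun (d : PySem.Dict String (List Int)) p => d.modify p.2 [] (· ++ [p.1]))
      PySem.Dict.empty
    let out := positions.items.foldl
      (fun (out : List String) q =>
        (PySem.List.enumerate q.2 0).foldl
          (fun (out : List String) r =>
            out.set r.2.toNat (if r.1 = 0 then q.1 else q.1 ++ "#" ++ PySem.Int.toStr r.1))
          out)
      (List.replicate grams.length "")
    some out

-- ===== PRECONDITION & SPEC =====
def Spec_stringToBagofgrams (record_s : String) (gram_len : Int) (out : Option (List String)) : Prop := out = stringToBagofgrams_alt record_s gram_len
instance (record_s : String) (gram_len : Int) (out : Option (List String)) : Decidable (Spec_stringToBagofgrams record_s gram_len out) := by unfold Spec_stringToBagofgrams; infer_instance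

-- ===== CLAIM (what is proved, stated in full; the proofs are below) =====
def Claim_equal_stringToBagofgrams : Prop := ∀ (record_s : String) (gram_len : Int), Dom_stringToBagofgrams record_s gram_len → Spec_stringToBagofgrams record_s gram_len (stringToBagofgrams record_s gram_len)

-- ===== LEMMAS AND PROOFS =====

-- A's loop body, as a function of the current gram (proof helper).
def pvStepA (st : PySem.Dict String Int × List String) (g : String) :
    PySem.Dict String Int × List String :=
  if st.1.contains g then
    let freq' := st.1.modify g 0 (· + 1)
    (freq', st.2 ++ [g ++ "#" ++ PySem.Int.toStr (freq'.getD g 0)])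
  else
    (st.1.insert g 0, st.2 ++ [g])

-- The common specification value at position p of the gram list G:
-- the gram, suffixed by the number of its earlier occurrences when positive.
def pvTagB (G : List String) (p : Int × String) : String :=
  let c := PySem.List.count (PySem.List.slice G none (some p.1)) p.2
  if c = 0 then p.2 else p.2 ++ "#" ++ PySem.Int.toStr (c : Int)

def pvT (G : List String) : List String := (PySem.List.enumerate G 0).map (pvTagB G)

-- value written for gram g as its k-th occurrence
def pvVal (g : String) (k : Int) : String :=
  if k = 0 then g else g ++ "#" ++ PySem.Int.toStr k

-- the list of window positions of gram g, in order
def pvPosL (G : List String) (g : String) : List Int :=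
  ((PySem.List.enumerate G 0).filter (fun p => p.2 == g)).map (·.1)

-- B's grouping dict
def pvD (G : List String) : PySem.Dict String (List Int) :=
  (PySem.List.enumerate G 0).foldl
    (fun (d : PySem.Dict String (List Int)) p => d.modify p.2 [] (· ++ [p.1]))
    PySem.Dict.empty

-- the intended content of output slot j
def pvF (G : List String) (j : Nat) : String :=
  if h : j < G.length then pvVal G[j] ((G.take j).count G[j] : Int) else ""

-- B's scatter writes, flattened to one list of (index, value) pairs
def pvWrites (G : List String) : List (Nat × String) :=
  (pvD G).items.flatMap
    (fun q => (PySem.List.enumerate q.2 0).map (fun r => (r.2.toNat, pvVal q.1 r.1)))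

-- ---- A-side: the loop invariant ----
lemma pvLoop_inv (G : List String) :
    (∀ g, (G.foldl pvStepA (PySem.Dict.empty, ([] : List String))).1.contains g
          = decide (g ∈ G)) ∧
    (∀ g ∈ G, (G.foldl pvStepA (PySem.Dict.empty, ([] : List String))).1.getD g 0
          = (G.count g : Int) - 1) ∧
    (G.foldl pvStepA (PySem.Dict.empty, ([] : List String))).2
          = (PySem.List.enumerate G 0).map (pvTagB G) := by
  induction G using List.reverseRecOn with
  | nil => simp
  | append_singleton G' g ih =>
    obtain ⟨hc, hd, hacc⟩ := ih
    rw [List.foldl_append]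
    simp only [List.foldl_cons, List.foldl_nil]
    have htag : ∀ p ∈ PySem.List.enumerate G' 0, pvTagB (G' ++ [g]) p = pvTagB G' p := by
      intro p hp
      rw [PySem.List.mem_enumerate_iff] at hp
      obtain ⟨k, hk, rfl⟩ := hp
      simp only [pvTagB, zero_add]
      rw [PySem.List.slice_to_natCast, PySem.List.slice_to_natCast,
        List.take_append_of_le_length (le_of_lt hk)]
    have henum : (PySem.List.enumerate (G' ++ [g]) 0).map (pvTagB (G' ++ [g]))
        = (PySem.List.enumerate G' 0).map (pvTagB G') ++ [pvTagB (G' ++ [g]) ((G'.length : Int), g)] := by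
      rw [PySem.List.enumerate_append]
      simp [List.map_congr_left htag, PySem.List.enumerate]
    have hlast : pvTagB (G' ++ [g]) ((G'.length : Int), g)
        = if G'.count g = 0 then g else g ++ "#" ++ PySem.Int.toStr (G'.count g : Int) := by
      simp only [pvTagB]
      rw [PySem.List.slice_to_natCast, List.take_append_of_le_length (le_refl _),
        List.take_length, PySem.List.count_eq]
    by_cases hmem : g ∈ G'
    · -- duplicate gram: A increments its counter; the counter equals the earlier-occurrence count
      simp only [pvStepA, hc, hmem, decide_true, if_true]
      have hcount : 1 ≤ G'.count g := List.one_le_count_iff.mpr hmem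
      refine ⟨?_, ?_, ?_⟩
      · intro g'
        by_cases hgg : g' = g
        · subst hgg; simp [PySem.Dict.contains_modify, hc, hmem]
        · simp [PySem.Dict.contains_modify, hc, List.mem_append, hgg]
      · intro g' hg'
        by_cases hgg : g' = g
        · subst hgg
          rw [PySem.Dict.getD_modify_self, hd _ hmem]
          simp [List.count_append]
        · rw [PySem.Dict.getD_modify, if_neg hgg]
          have hg'' : g' ∈ G' := by
            rcases List.mem_append.mp hg' with h | h
            · exact h
            · simp at h; exact absurd h hgg
          rw [hd g' hg'']
          simp [List.count_append, List.count_singleton]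
          exact fun hh => hgg hh.symm
      · rw [henum, hlast]
        simp only [hacc]
        congr 1
        rw [PySem.Dict.getD_modify_self, hd g hmem]
        have : (G'.count g : Int) - 1 + 1 = (G'.count g : Int) := by ring
        rw [this, if_neg (by omega)]
    · -- fresh gram: A inserts counter 0 and emits the raw gram; its earlier-occurrence count is 0
      simp only [pvStepA, hc, hmem, decide_false, Bool.false_eq_true, if_false]
      refine ⟨?_, ?_, ?_⟩
      · intro g'
        by_cases hgg : g' = g
        · subst hgg; simp [PySem.Dict.contains_insert_self]
        · simp [PySem.Dict.contains_insert, hgg, hc, List.mem_append]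
      · intro g' hg'
        by_cases hgg : g' = g
        · subst hgg
          rw [PySem.Dict.getD_insert_self]
          simp [List.count_append, List.count_eq_zero_of_not_mem hmem]
        · rw [PySem.Dict.getD_insert, if_neg hgg]
          have hg'' : g' ∈ G' := by
            rcases List.mem_append.mp hg' with h | h
            · exact h
            · simp at h; exact absurd h hgg
          rw [hd g' hg'']
          simp [List.count_append, List.count_singleton]
          exact fun hh => hgg hh.symm
      · rw [henum, hlast, hacc]
        rw [if_pos (List.count_eq_zero_of_not_mem hmem)]

-- ---- B-side: the grouping dict ----
lemma pvD_eq (G : List String) :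
    pvD G = ((PySem.List.enumerate G 0).map Prod.swap).foldl
      (fun (d : PySem.Dict String (List Int)) p => d.modify p.1 [] (· ++ [p.2]))
      PySem.Dict.empty := by
  unfold pvD; rw [List.foldl_map]; rfl

lemma pvD_keys (G : List String) : (pvD G).keys = PySem.Set.ofList G := by
  rw [pvD_eq, PySem.Dict.keys_foldl_modify_key]
  rw [PySem.Dict.keys_empty, PySem.Set.update_nil_left]
  have h2 : ((PySem.List.enumerate G 0).map Prod.swap).map (fun p => p.1) = G := by
    rw [List.map_map]
    exact PySem.List.map_snd_enumerate G 0
  rw [h2]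

lemma pvD_nodup (G : List String) : (pvD G).keys.Nodup := by
  rw [pvD_keys]
  exact PySem.Set.nodup_ofList G

lemma pvD_getD (G : List String) (g : String) : (pvD G).getD g [] = pvPosL G g := by
  rw [pvD_eq, PySem.Dict.getD_foldl_modify_append, PySem.Dict.getD_empty]
  rw [List.filter_map, List.map_map, pvPosL]
  rfl

lemma pvD_items (G : List String) :
    (pvD G).items = (PySem.Set.ofList G).map (fun g => (g, pvPosL G g)) := by
  rw [PySem.Dict.items_eq_map_keys (pvD G) (pvD_nodup G) [], pvD_keys]
  exact List.map_congr_left (fun g _ => by rw [pvD_getD])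

-- ---- B-side: the position lists ----
lemma pvPosL_append (G : List String) (g' g : String) :
    pvPosL (G ++ [g']) g
      = pvPosL G g ++ (if g' = g then [(G.length : Int)] else []) := by
  by_cases h : g' = g <;>
    simp [pvPosL, PySem.List.enumerate_append, PySem.List.enumerate_cons,
      PySem.List.enumerate_nil, List.filter_append, h]

lemma pvPosL_length (G : List String) (g : String) :
    (pvPosL G g).length = G.count g := by
  rw [pvPosL, List.length_map, ← List.countP_eq_length_filter]
  have h := List.countP_map (p := (fun x : String => x == g))
    (f := (fun p : Int × String => p.2)) (l := PySem.List.enumerate G 0)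
  rw [PySem.List.map_snd_enumerate] at h
  rw [List.count_eq_countP]
  exact h.symm

lemma pvPosL_spec (G : List String) (g : String) :
    ∀ k, k < (pvPosL G g).length → ∃ i : Nat,
      (pvPosL G g)[k]? = some (i : Int) ∧ i < G.length ∧ G[i]? = some g ∧ (G.take i).count g = k := by
  induction G using List.reverseRecOn with
  | nil =>
    intro k hk
    rw [pvPosL] at hk
    simp [PySem.List.enumerate_nil] at hk
  | append_singleton G' g' ih =>
    intro k hk
    rw [pvPosL_append] at hk ⊢
    by_cases hlt : k < (pvPosL G' g).length
    · obtain ⟨i, h1, h2, h3, h4⟩ := ih k hlt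
      refine ⟨i, ?_, ?_, ?_, ?_⟩
      · rw [List.getElem?_append_left hlt]; exact h1
      · calc i < G'.length := h2
          _ ≤ (G' ++ [g']).length := by simp
      · rw [List.getElem?_append_left h2]; exact h3
      · rw [List.take_append_of_le_length (le_of_lt h2)]; exact h4
    · have hif : g' = g := by
        by_contra hng
        simp only [hng, if_false] at hk
        simp at hk
        omega
      subst hif
      rw [if_pos rfl] at hk ⊢
      have hk' : k = (pvPosL G' g').length := by
        simp at hk
        omega
      refine ⟨G'.length, ?_, by simp, ?_, ?_⟩
      · rw [hk']
        exact List.getElem?_concat_length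
      · exact List.getElem?_concat_length
      · rw [List.take_left, hk', pvPosL_length]

-- ---- B-side: folds of in-place writes ----
lemma pvFoldSet_getElem? (f : Nat → String) (ws : List (Nat × String))
    (hw : ∀ w ∈ ws, w.2 = f w.1) (out : List String) (j : Nat) :
    (ws.foldl (fun o w => o.set w.1 w.2) out)[j]?
      = if ws.any (fun w => w.1 == j) then
          (if j < out.length then some (f j) else none)
        else out[j]? := by
  induction ws generalizing out with
  | nil => simp
  | cons w ws ih =>
    simp only [List.foldl_cons, List.any_cons]
    rw [ih (fun w' h' => hw w' (List.mem_cons_of_mem _ h')), List.length_set]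
    have hset : (out.set w.1 w.2)[j]? = if w.1 = j ∧ w.1 < out.length then some w.2 else out[j]? := by
      rw [List.getElem?_set]
      split_ifs with h1 h2 h3 <;> simp_all
      omega
    by_cases ha : ws.any (fun w => w.1 == j) = true
    · simp [ha]
    · rw [Bool.not_eq_true] at ha
      simp only [ha, Bool.or_false, Bool.false_eq_true, if_false]
      by_cases he : w.1 = j
      · subst he
        rw [hset]
        have hv : w.2 = f w.1 := hw w (List.mem_cons_self ..)
        by_cases hr : w.1 < out.length
        · simp [hr, hv]
        · simp [hr]
      · rw [hset, if_neg (by tauto)]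
        simp [he]

lemma pvWrites_val (G : List String) : ∀ w ∈ pvWrites G, w.2 = pvF G w.1 := by
  intro w hw
  rw [pvWrites, List.mem_flatMap] at hw
  obtain ⟨q, hq, hw2⟩ := hw
  rw [pvD_items, List.mem_map] at hq
  obtain ⟨g, hg, rfl⟩ := hq
  rw [List.mem_map] at hw2
  obtain ⟨r, hr, rfl⟩ := hw2
  rw [PySem.List.mem_enumerate_iff] at hr
  obtain ⟨k, hk, rfl⟩ := hr
  obtain ⟨i, h1, h2, h3, h4⟩ := pvPosL_spec G g k hk
  rw [List.getElem?_eq_getElem hk] at h1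
  have hgetk : (pvPosL G g)[k] = (i : Int) := Option.some.inj h1
  simp only [hgetk, zero_add, Int.toNat_natCast]
  rw [pvF, dif_pos h2]
  have hGi : G[i] = g := by
    rw [List.getElem?_eq_getElem h2] at h3
    exact Option.some.inj h3
  rw [hGi, h4]

lemma pvWrites_cover (G : List String) (j : Nat) (hj : j < G.length) :
    (pvWrites G).any (fun w => w.1 == j) = true := by
  rw [List.any_eq_true]
  have hgj : (j : Int) ∈ pvPosL G G[j] := by
    rw [pvPosL, List.mem_map]
    refine ⟨((j : Int), G[j]), ?_, rfl⟩
    rw [List.mem_filter]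
    constructor
    · have := PySem.List.mem_enumerate_iff (p := ((j : Int), G[j])) (xs := G) (s := 0)
      rw [this]
      exact ⟨j, hj, by simp⟩
    · simp
  obtain ⟨k, hk, hke⟩ := List.getElem_of_mem hgj
  refine ⟨((j : Int).toNat, pvVal G[j] (0 + (k : Int))), ?_, by simp⟩
  rw [pvWrites, List.mem_flatMap]
  refine ⟨(G[j], pvPosL G G[j]), ?_, ?_⟩
  · rw [pvD_items, List.mem_map]
    exact ⟨G[j], (PySem.Set.mem_ofList G G[j]).mpr (List.getElem_mem hj), rfl⟩
  · rw [List.mem_map]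
    refine ⟨(0 + (k : Int), (pvPosL G G[j])[k]), ?_, by rw [hke]⟩
    rw [PySem.List.mem_enumerate_iff]
    exact ⟨k, hk, rfl⟩

-- ---- B-side: the scatter result is the specification list ----
lemma pvScatter (G : List String) :
    (pvD G).items.foldl
      (fun (out : List String) q =>
        (PySem.List.enumerate q.2 0).foldl
          (fun (out : List String) r => out.set r.2.toNat (pvVal q.1 r.1)) out)
      (List.replicate G.length "")
    = pvT G := by
  have hfun : (fun (out : List String) q =>
      (PySem.List.enumerate q.2 0).foldl
        (fun (out : List String) r => out.set r.2.toNat (pvVal q.1 r.1)) out)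
      = (fun (a : List String) (x : String × List Int) =>
        ((PySem.List.enumerate x.2 0).map
          (fun r => (r.2.toNat, pvVal x.1 r.1))).foldl (fun o w => o.set w.1 w.2) a) := by
    funext a x
    rw [List.foldl_map]
  rw [hfun, ← List.foldl_flatMap, ← pvWrites]
  apply List.ext_getElem?
  intro j
  rw [pvFoldSet_getElem? (pvF G) _ (pvWrites_val G), List.length_replicate]
  by_cases hj : j < G.length
  · rw [pvWrites_cover G j hj, if_pos rfl, if_pos hj]
    rw [pvT, List.getElem?_map, PySem.List.getElem?_enumerate, List.getElem?_eq_getElem hj]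
    simp only [Option.map_some]
    congr 1
    rw [pvF, dif_pos hj]
    simp only [pvTagB, zero_add, PySem.List.slice_to_natCast, PySem.List.count_eq]
    by_cases hc : (G.take j).count G[j] = 0 <;> simp [hc, pvVal]
  · have h1 : (List.replicate G.length "")[j]? = (none : Option String) :=
      List.getElem?_eq_none (by simpa using Nat.le_of_not_lt hj)
    have h2 : (pvT G)[j]? = (none : Option String) := by
      apply List.getElem?_eq_none
      simp [pvT, Nat.le_of_not_lt hj]
    rw [h2, h1, if_neg hj]
    split <;> rfl

-- ===== VERDICT (by name: the statement is the Claim_ definition above) =====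
theorem stringToBagofgrams_spec : Claim_equal_stringToBagofgrams := by
  intro record_s gram_len _
  unfold Spec_stringToBagofgrams stringToBagofgrams stringToBagofgrams_alt
  by_cases h : PySem.Str.len record_s < gram_len
  · rw [if_pos h, if_pos h]
  · rw [if_neg h, if_neg h]
    have hA := (pvLoop_inv ((PySem.List.pyRange 0 (PySem.Str.len record_s - gram_len + 1) 1).map
        (fun i => PySem.Str.slice record_s (some i) (some (i + gram_len))))).2.2
    rw [List.foldl_map] at hA
    have hB := pvScatter ((PySem.List.pyRange 0 (PySem.Str.len record_s - gram_len + 1) 1).map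
        (fun i => PySem.Str.slice record_s (some i) (some (i + gram_len))))
    exact congrArg some (hA.trans hB.symm)
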